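-- pv_equiv track=rewrite | github.com/LogosRoboticsGroup/UniWorldVLA | data_utils/sequence_visualizer.py | _find_diff_ranges
-- ===== SOURCE A (Python) =====
-- def _find_diff_ranges(diff_mask):
--     """
--     从差异掩码中找出连续的不一致区间
--
--     :param diff_mask: 布尔数组，True表示该位置不一致
--     :return: 区间列表，每个区间为 [start_idx, end_idx]
--     """
--     ranges = []
--     in_range = False
--     start_idx = 0
--
--     for i, is_diff in enumerate(diff_mask):
--         if is_diff and not in_range:
--             # 开始一个新的不一致区间
--             start_idx = i
--             in_range = True
--         elif not is_diff and in_range: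
--             # 结束当前不一致区间
--             ranges.append([start_idx, i - 1])
--             in_range = False
--
--     # 处理最后一个区间
--     if in_range:
--         ranges.append([start_idx, len(diff_mask) - 1])
--
--     return ranges
-- ===== SOURCE B (Python) =====
-- from itertools import groupby
--
-- def _find_diff_ranges(diff_mask):
--     ranges = []
--     offset = 0
--     for key, grp in groupby(diff_mask, key=bool):
--         length = len(list(grp))
--         if key:
--             ranges.append([offset, offset + length - 1])
--         offset += length
--     return ranges
-- ===== Notes on version B (the rewrite author's own statement) =====
-- stated objective: idiomatic
-- what changed: Replaces the explicit in_range/start_idx state machine (with end-of-loop flush) by itertools.groupby run-grouping: iterate maximal runs of equal truth values, emitting [offset, offset+len-1] for True runs.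
import Mathlib
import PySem

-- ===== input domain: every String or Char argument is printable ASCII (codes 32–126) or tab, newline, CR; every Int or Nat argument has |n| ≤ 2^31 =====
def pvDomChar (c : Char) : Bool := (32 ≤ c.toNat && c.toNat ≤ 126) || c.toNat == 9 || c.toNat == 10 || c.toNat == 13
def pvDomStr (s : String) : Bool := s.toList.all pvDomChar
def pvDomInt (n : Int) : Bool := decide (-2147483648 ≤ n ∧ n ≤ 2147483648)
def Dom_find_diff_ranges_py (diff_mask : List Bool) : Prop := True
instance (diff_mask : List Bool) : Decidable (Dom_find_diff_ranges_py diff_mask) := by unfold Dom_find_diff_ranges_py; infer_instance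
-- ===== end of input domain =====

-- B replaces A's in_range/start_idx state machine by run-grouping (itertools.groupby): same O(n) cost, plainer shape.

-- ===== PORT A =====
-- the for-loop over enumerate(diff_mask) with state (ranges, in_range, start_idx);
-- the trailing 'if in_range: ranges.append([start_idx, len(diff_mask)-1])' is the [] case,
-- where i has reached len(diff_mask).
def find_diff_ranges_py_go : List Bool → Int → List (List Int) → Bool → Int → List (List Int)
  | [], i, ranges, in_range, start_idx =>
      if in_range then ranges ++ [[start_idx, i - 1]] else ranges
  | is_diff :: rest, i, ranges, in_range, start_idx =>
      if is_diff && !in_range then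
        find_diff_ranges_py_go rest (i + 1) ranges true i
      else if !is_diff && in_range then
        find_diff_ranges_py_go rest (i + 1) (ranges ++ [[start_idx, i - 1]]) false start_idx
      else
        find_diff_ranges_py_go rest (i + 1) ranges in_range start_idx

def find_diff_ranges_py (diff_mask : List Bool) : List (List Int) :=
  find_diff_ranges_py_go diff_mask 0 [] false 0

-- ===== PORT B =====
-- groupby(diff_mask, key=bool): each step consumes one maximal run of equal values starting
-- at offset; a True run emits [offset, offset + length - 1].
def find_diff_ranges_py_alt_go : List Bool → Int → List (List Int)
  | [], _ => []
  | b :: rest, offset =>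
      let run := rest.takeWhile (· == b)
      let length : Int := 1 + (run.length : Int)
      (if b then [[offset, offset + length - 1]] else []) ++
        find_diff_ranges_py_alt_go (rest.dropWhile (· == b)) (offset + length)
termination_by l => l.length
decreasing_by
  simpa using Nat.lt_succ_of_le (List.length_dropWhile_le _ _)

def find_diff_ranges_py_alt (diff_mask : List Bool) : List (List Int) :=
  find_diff_ranges_py_alt_go diff_mask 0

-- ===== PRECONDITION & SPEC =====
def Spec_find_diff_ranges_py (diff_mask : List Bool) (out : List (List Int)) : Prop := out = find_diff_ranges_py_alt diff_mask
instance (diff_mask : List Bool) (out : List (List Int)) : Decidable (Spec_find_diff_ranges_py diff_mask out) := by unfold Spec_find_diff_ranges_py; infer_instance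

-- ===== CLAIM (what is proved, stated in full; the proofs are below) =====
def Claim_equal_find_diff_ranges_py : Prop := ∀ (diff_mask : List Bool), Dom_find_diff_ranges_py diff_mask → Spec_find_diff_ranges_py diff_mask (find_diff_ranges_py diff_mask)

-- ===== LEMMAS AND PROOFS =====

-- a leading False element only advances the offset: the False run it heads emits nothing
lemma alt_go_false_cons (rest : List Bool) (i : Int) :
    find_diff_ranges_py_alt_go (false :: rest) i = find_diff_ranges_py_alt_go rest (i + 1) := by
  cases rest with
  | nil => simp [find_diff_ranges_py_alt_go]
  | cons b r2 =>
      cases b with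
      | true => simp [find_diff_ranges_py_alt_go]
      | false =>
          rw [find_diff_ranges_py_alt_go, find_diff_ranges_py_alt_go]
          simp only [List.takeWhile, List.dropWhile]
          norm_num
          ring_nf

-- loop invariant: A's state machine outside a run (in_range = false) appends exactly
-- B's run decomposition of the remaining list; inside a run (in_range = true, started at s)
-- it first closes the pending True run, then continues with B's decomposition.
lemma go_eq_alt (l : List Bool) :
    (∀ (i : Int) (r : List (List Int)) (s : Int),
        find_diff_ranges_py_go l i r false s = r ++ find_diff_ranges_py_alt_go l i) ∧
    (∀ (i : Int) (r : List (List Int)) (s : Int),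
        find_diff_ranges_py_go l i r true s =
          (r ++ [[s, i + ((l.takeWhile (· == true)).length : Int) - 1]]) ++
            find_diff_ranges_py_alt_go (l.dropWhile (· == true))
              (i + ((l.takeWhile (· == true)).length : Int))) := by
  induction l with
  | nil =>
      constructor
      · intro i r s; simp [find_diff_ranges_py_go, find_diff_ranges_py_alt_go]
      · intro i r s; simp [find_diff_ranges_py_go, find_diff_ranges_py_alt_go]
  | cons b rest ih =>
      obtain ⟨ihF, ihT⟩ := ih
      constructor
      · intro i r s
        cases b with
        | true =>
            rw [find_diff_ranges_py_go, if_pos (by decide)]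
            rw [ihT (i + 1) r i]
            rw [find_diff_ranges_py_alt_go]
            have h : i + (1 + ((rest.takeWhile (· == true)).length : Int))
                = i + 1 + ((rest.takeWhile (· == true)).length : Int) := by ring
            simp only [if_true, List.append_assoc, h]
        | false =>
            rw [find_diff_ranges_py_go, if_neg (by decide), if_neg (by decide)]
            rw [ihF (i + 1) r s, alt_go_false_cons]
      · intro i r s
        cases b with
        | true =>
            rw [find_diff_ranges_py_go, if_neg (by decide), if_neg (by decide)]
            rw [ihT (i + 1) r s]
            have h : i + (((rest.takeWhile (· == true)).length + 1 : Nat) : Int)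
                = i + 1 + ((rest.takeWhile (· == true)).length : Int) := by push_cast; ring
            simp only [List.takeWhile, List.dropWhile, beq_self_eq_true, List.length_cons, h]
        | false =>
            rw [find_diff_ranges_py_go, if_neg (by decide), if_pos (by decide)]
            rw [ihF (i + 1) (r ++ [[s, i - 1]]) s]
            simp [List.takeWhile, List.dropWhile, alt_go_false_cons]

-- ===== VERDICT (by name: the statement is the Claim_ definition above) =====
theorem find_diff_ranges_py_spec : Claim_equal_find_diff_ranges_py := by
  intro diff_mask _
  unfold Spec_find_diff_ranges_py find_diff_ranges_py find_diff_ranges_py_alt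
  simpa using (go_eq_alt diff_mask).1 0 [] 0
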